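-- pv_equiv track=rewrite | github.com/ruiwynt/python-repo | comp3027/max_ascending.py | max_ascending
-- ===== SOURCE A (Python) =====
-- def max_ascending(arr):
--     L = [1]
--     for i in range(1, len(arr)):
--         if arr[i] > arr[i-1]:
--             L.append(L[-1]+1)
--         else:
--             L.append(1)
--     f = L.index(max(L))
--     s = f
--     while L[s] != 1:
--         s -= 1
--     return arr[s:f+1], s, f
-- ===== SOURCE B (Python) =====
-- def max_ascending(arr):
--     best_len, best_end, cur = 1, 0, 1
--     for i in range(1, len(arr)):
--         cur = cur + 1 if arr[i] > arr[i-1] else 1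
--         if cur > best_len:
--             best_len, best_end = cur, i
--     start = best_end - best_len + 1
--     return arr[start:best_end+1], start, best_end
-- ===== Notes on version B (the rewrite author's own statement) =====
-- stated objective: simpler
-- what changed: Replaces the O(n)-space DP list plus separate max/index scan and backward while-walk with a single forward pass keeping only (best_len, best_end, cur), computing the start by arithmetic.
import Mathlib
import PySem

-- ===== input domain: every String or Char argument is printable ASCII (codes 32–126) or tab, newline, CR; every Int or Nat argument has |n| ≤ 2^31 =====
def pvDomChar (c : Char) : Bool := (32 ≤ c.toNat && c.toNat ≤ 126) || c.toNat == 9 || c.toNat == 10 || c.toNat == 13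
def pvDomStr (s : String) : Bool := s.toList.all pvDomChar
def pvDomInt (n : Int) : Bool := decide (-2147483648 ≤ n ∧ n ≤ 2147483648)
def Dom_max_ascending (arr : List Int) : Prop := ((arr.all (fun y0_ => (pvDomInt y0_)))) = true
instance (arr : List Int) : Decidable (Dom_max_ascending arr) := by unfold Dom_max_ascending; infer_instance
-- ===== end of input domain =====

-- B replaces A's O(n)-space run-length list, its max/index scans and its backward
-- while-walk by a single forward pass with three scalars; objective: simpler.

-- ===== PORT A =====
-- A-side helper: the back-walk 'while L[s] != 1: s -= 1'.  On A's list L[0] = 1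
-- always, so the guard is false at s = 0; Python never goes below 0 there.
def pvWalkA (L : List Int) : Nat → Nat
  | 0 => 0
  | (s+1) => if L.getD (s+1) 0 = 1 then s + 1 else pvWalkA L s

def max_ascending (arr : List Int) : List Int × Int × Int :=
  let L := (PySem.List.pyRange 1 (arr.length : Int)).foldl
    (fun L i =>
      if PySem.List.pyGetD arr i 0 > PySem.List.pyGetD arr (i - 1) 0 then
        L ++ [PySem.List.pyGetD L (-1) 0 + 1]
      else
        L ++ [1]) [1]
  -- max(L) and L.index(max(L)): L is nonempty ([1] seeded), so neither raises
  let m := (PySem.List.max? L (fun x => x)).getD 0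
  let f := (PySem.List.index? L m).getD 0
  let s := pvWalkA L f
  (PySem.List.slice arr (some (s : Int)) (some ((f : Int) + 1)), (s : Int), (f : Int))

-- ===== PORT B =====
def max_ascending_alt (arr : List Int) : List Int × Int × Int :=
  let st := (PySem.List.pyRange 1 (arr.length : Int)).foldl
    (fun (st : Int × Int × Int) i =>
      let cur := if PySem.List.pyGetD arr i 0 > PySem.List.pyGetD arr (i - 1) 0 then st.2.2 + 1 else 1
      if cur > st.1 then (cur, i, cur) else (st.1, st.2.1, cur))
    (1, 0, 1)
  let start := st.2.1 - st.1 + 1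
  (PySem.List.slice arr (some start) (some (st.2.1 + 1)), start, st.2.1)

-- ===== PRECONDITION & SPEC =====
def Spec_max_ascending (arr : List Int) (out : List Int × Int × Int) : Prop := out = max_ascending_alt arr
instance (arr : List Int) (out : List Int × Int × Int) : Decidable (Spec_max_ascending arr out) := by unfold Spec_max_ascending; infer_instance

-- ===== CLAIM (what is proved, stated in full; the proofs are below) =====
def Claim_equal_max_ascending : Prop := ∀ (arr : List Int), Dom_max_ascending arr → Spec_max_ascending arr (max_ascending arr)

-- ===== LEMMAS AND PROOFS =====

-- run length of the ascending run ending at index k (A's L[k], B's cur after step k)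
def pvRun (arr : List Int) : Nat → Int
  | 0 => 1
  | (k+1) => if arr.getD (k+1) 0 > arr.getD k 0 then pvRun arr k + 1 else 1

-- best run length seen up to index k
def pvBest (arr : List Int) : Nat → Int
  | 0 => 1
  | (k+1) => max (pvBest arr k) (pvRun arr (k+1))

-- end index of the FIRST best run up to index k
def pvEnd (arr : List Int) : Nat → Nat
  | 0 => 0
  | (k+1) => if pvRun arr (k+1) > pvBest arr k then k + 1 else pvEnd arr k

theorem pvRun_pos (arr : List Int) (k : Nat) : 1 ≤ pvRun arr k := by
  cases k with
  | zero => simp [pvRun]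
  | succ k =>
    rw [pvRun]
    split
    · have := pvRun_pos arr k; omega
    · omega

theorem pvRun_le (arr : List Int) (k : Nat) : pvRun arr k ≤ (k : Int) + 1 := by
  induction k with
  | zero => simp [pvRun]
  | succ k ih =>
    rw [pvRun]
    split
    · push_cast; omega
    · push_cast; omega

theorem pvRun_succ_ne_one (arr : List Int) (k : Nat) (h : pvRun arr (k+1) ≠ 1) :
    pvRun arr (k+1) = pvRun arr k + 1 := by
  rw [pvRun] at h ⊢
  split
  · rfl
  · simp_all

-- combined argmax invariant for pvBest / pvEnd
theorem pvArg (arr : List Int) (m : Nat) :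
    pvEnd arr m ≤ m ∧ pvRun arr (pvEnd arr m) = pvBest arr m ∧
    (∀ j, j < pvEnd arr m → pvRun arr j < pvBest arr m) ∧
    (∀ j, j ≤ m → pvRun arr j ≤ pvBest arr m) := by
  induction m with
  | zero =>
    refine ⟨le_refl _, by simp [pvEnd, pvBest, pvRun], ?_, ?_⟩
    · intro j hj; simp [pvEnd] at hj
    · intro j hj
      have hj0 : j = 0 := by omega
      subst hj0; simp [pvBest, pvRun]
  | succ m ih =>
    obtain ⟨h1, h2, h3, h4⟩ := ih
    by_cases hc : pvRun arr (m+1) > pvBest arr m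
    · have he : pvEnd arr (m+1) = m + 1 := by rw [pvEnd]; simp [hc]
      have hb : pvBest arr (m+1) = pvRun arr (m+1) := by
        rw [pvBest]; exact max_eq_right (le_of_lt hc)
      refine ⟨by omega, by rw [he, hb], ?_, ?_⟩
      · intro j hj
        rw [he] at hj; rw [hb]
        exact lt_of_le_of_lt (h4 j (by omega)) hc
      · intro j hj
        rw [hb]
        by_cases hjm : j = m + 1
        · subst hjm; exact le_refl _
        · exact le_of_lt (lt_of_le_of_lt (h4 j (by omega)) hc)
    · have he : pvEnd arr (m+1) = pvEnd arr m := by rw [pvEnd]; simp [hc]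
      have hb : pvBest arr (m+1) = pvBest arr m := by
        rw [pvBest]; exact max_eq_left (by omega)
      refine ⟨by omega, by rw [he, hb]; exact h2, ?_, ?_⟩
      · intro j hj; rw [he] at hj; rw [hb]; exact h3 j hj
      · intro j hj
        rw [hb]
        by_cases hjm : j = m + 1
        · subst hjm; omega
        · exact h4 j (by omega)

-- A's loop builds exactly the list of run lengths
theorem pvFoldA (arr : List Int) (m : Nat) :
    (PySem.List.pyRange 1 ((m : Int) + 1)).foldl
      (fun L i =>
        if PySem.List.pyGetD arr i 0 > PySem.List.pyGetD arr (i - 1) 0 then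
          L ++ [PySem.List.pyGetD L (-1) 0 + 1]
        else
          L ++ [1]) [1]
    = (List.range (m+1)).map (pvRun arr) := by
  induction m with
  | zero =>
    rw [show (((0:Nat) : Int) + 1) = 1 by norm_num]
    rw [show PySem.List.pyRange 1 1 = [] from by decide]
    simp [pvRun]
  | succ m ih =>
    have hr : ((m : Int) + 1) + 1 = (((m+1) : Nat) : Int) + 1 := by push_cast; ring
    have hstep := PySem.List.pyRange_one_succ_right (a := 1) (b := (m : Int) + 1) (by omega)
    rw [← hr, hstep, List.foldl_append, ih]
    have hcast2 : ((m : Int) + 1) - 1 = ((m : Nat) : Int) := by ring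
    have hcast1 : ((m : Int) + 1) = (((m+1) : Nat) : Int) := by push_cast; ring
    simp only [List.foldl_cons, List.foldl_nil]
    rw [hcast2, hcast1, PySem.List.pyGetD_natCast, PySem.List.pyGetD_natCast]
    have hsplit : (List.range (m+1)).map (pvRun arr)
        = (List.range m).map (pvRun arr) ++ [pvRun arr m] := by
      rw [List.range_succ, List.map_append]; rfl
    have hsplit2 : (List.range (m+1+1)).map (pvRun arr)
        = (List.range (m+1)).map (pvRun arr) ++ [pvRun arr (m+1)] := by
      rw [List.range_succ, List.map_append]; rfl
    rw [hsplit2]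
    conv_lhs => rw [hsplit]
    rw [PySem.List.pyGetD_neg_one_append_singleton]
    rw [show pvRun arr (m+1) = (if arr.getD (m+1) 0 > arr.getD m 0 then pvRun arr m + 1 else 1) from rfl]
    split <;> rw [← hsplit]

-- B's loop computes (best length, first best end, current run)
theorem pvFoldB (arr : List Int) (m : Nat) :
    (PySem.List.pyRange 1 ((m : Int) + 1)).foldl
      (fun (st : Int × Int × Int) i =>
        let cur := if PySem.List.pyGetD arr i 0 > PySem.List.pyGetD arr (i - 1) 0 then st.2.2 + 1 else 1
        if cur > st.1 then (cur, i, cur) else (st.1, st.2.1, cur))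
      (1, 0, 1)
    = (pvBest arr m, ((pvEnd arr m : Nat) : Int), pvRun arr m) := by
  induction m with
  | zero =>
    rw [show (((0:Nat) : Int) + 1) = 1 by norm_num]
    rw [show PySem.List.pyRange 1 1 = [] from by decide]
    simp [pvBest, pvEnd, pvRun]
  | succ m ih =>
    have hr : ((m : Int) + 1) + 1 = (((m+1) : Nat) : Int) + 1 := by push_cast; ring
    have hstep := PySem.List.pyRange_one_succ_right (a := 1) (b := (m : Int) + 1) (by omega)
    rw [← hr, hstep, List.foldl_append, ih]
    have hcast2 : ((m : Int) + 1) - 1 = ((m : Nat) : Int) := by ring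
    have hcast1 : ((m : Int) + 1) = (((m+1) : Nat) : Int) := by push_cast; ring
    simp only [List.foldl_cons, List.foldl_nil]
    rw [hcast2, hcast1, PySem.List.pyGetD_natCast, PySem.List.pyGetD_natCast]
    rw [show (if arr.getD (m+1) 0 > arr.getD m 0 then pvRun arr m + 1 else 1) = pvRun arr (m+1) from rfl]
    by_cases hc : pvRun arr (m+1) > pvBest arr m
    · have hb : pvBest arr (m+1) = pvRun arr (m+1) := by
        rw [pvBest]; exact max_eq_right (le_of_lt hc)
      have he : pvEnd arr (m+1) = m + 1 := by rw [pvEnd]; simp [hc]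
      rw [hb, he]
      simp [hc]
    · have hb : pvBest arr (m+1) = pvBest arr m := by
        rw [pvBest]; exact max_eq_left (by omega)
      have he : pvEnd arr (m+1) = pvEnd arr m := by rw [pvEnd]; simp [hc]
      rw [hb, he]
      simp [hc]

-- max(L) is pvBest
theorem pvMaxL (arr : List Int) (m : Nat) :
    PySem.List.max? ((List.range (m+1)).map (pvRun arr)) (fun x => x) = some (pvBest arr m) := by
  suffices h : ∃ t, (List.range (m+1)).map (pvRun arr) = pvRun arr 0 :: t ∧
      List.foldl max (pvRun arr 0) t = pvBest arr m by
    obtain ⟨t, ht, hf⟩ := h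
    rw [ht, PySem.List.max?_id_cons, hf]
  induction m with
  | zero => exact ⟨[], by simp, by simp [pvBest, pvRun]⟩
  | succ m ih =>
    obtain ⟨t, ht, hf⟩ := ih
    refine ⟨t ++ [pvRun arr (m+1)], ?_, ?_⟩
    · rw [List.range_succ, List.map_append, ht]; rfl
    · rw [List.foldl_append, hf]
      simp [pvBest]

-- L.index(max(L)) is pvEnd
theorem pvIdxL (arr : List Int) (m : Nat) :
    PySem.List.index? ((List.range (m+1)).map (pvRun arr)) (pvBest arr m) = some (pvEnd arr m) := by
  obtain ⟨h1, h2, h3, _⟩ := pvArg arr m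
  set L := (List.range (m+1)).map (pvRun arr) with hL
  have hlen : L.length = m + 1 := by simp [hL]
  have hk : pvEnd arr m < L.length := by omega
  have hget : L[pvEnd arr m] = pvBest arr m := by
    simp [hL]
    exact h2
  rw [PySem.List.index?_eq_some_iff]
  refine ⟨L.take (pvEnd arr m), L.drop (pvEnd arr m + 1), ?_, ?_, ?_⟩
  · conv_lhs => rw [← List.take_append_drop (pvEnd arr m) L]
    rw [List.drop_eq_getElem_cons hk, hget]
  · simp [hlen]; omega
  · intro hmem
    rw [List.mem_take_iff_getElem] at hmem
    obtain ⟨j, hj, hje⟩ := hmem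
    have hj' : j < pvEnd arr m := by omega
    have : L[j] = pvRun arr j := by simp [hL]
    rw [this] at hje
    have := h3 j hj'
    omega

-- the back-walk lands at the start of the run
theorem pvWalk (arr : List Int) (m : Nat) (i : Nat) (hi : i < m + 1) :
    pvWalkA ((List.range (m+1)).map (pvRun arr)) i = i + 1 - (pvRun arr i).toNat := by
  induction i with
  | zero => simp [pvWalkA, pvRun]
  | succ s ih =>
    rw [pvWalkA]
    rw [PySem.List.getD_map_range (pvRun arr) (m+1) (s+1) 0 hi]
    by_cases h : pvRun arr (s+1) = 1
    · rw [if_pos h, h]; omega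
    · rw [if_neg h, ih (by omega)]
      have hs := pvRun_succ_ne_one arr s h
      have hp := pvRun_pos arr s
      rw [hs]
      omega

-- ===== VERDICT (by name: the statement is the Claim_ definition above) =====
theorem max_ascending_spec : Claim_equal_max_ascending := by
  intro arr _
  unfold Spec_max_ascending
  cases arr with
  | nil => decide
  | cons a t =>
    simp only [max_ascending, max_ascending_alt, List.length_cons]
    rw [show ((t.length + 1 : Nat) : Int) = ((t.length : Nat) : Int) + 1 by push_cast; ring]
    rw [pvFoldA (a :: t) t.length, pvFoldB (a :: t) t.length]
    rw [pvMaxL (a :: t) t.length]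
    simp only [Option.getD_some]
    rw [pvIdxL (a :: t) t.length]
    simp only [Option.getD_some]
    obtain ⟨h1, h2, _, _⟩ := pvArg (a :: t) t.length
    rw [pvWalk (a :: t) t.length (pvEnd (a :: t) t.length) (by omega)]
    rw [h2]
    have hpos : 1 ≤ pvBest (a :: t) t.length := by rw [← h2]; exact pvRun_pos _ _
    have hle : pvBest (a :: t) t.length ≤ (pvEnd (a :: t) t.length : Int) + 1 := by
      rw [← h2]; exact pvRun_le _ _
    rw [show ((pvEnd (a :: t) t.length + 1 - (pvBest (a :: t) t.length).toNat : Nat) : Int)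
        = ((pvEnd (a :: t) t.length : Nat) : Int) - pvBest (a :: t) t.length + 1 by omega]
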